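-- pv_equiv track=rewrite | github.com/krzyssikora/advent_of_code | aoc_2015/11_1_password.py | remove_forbidden_chars
-- ===== SOURCE A (Python) =====
-- def remove_forbidden_chars(word):
--     lst = list()
--     for character in ["i", "l", "o"]:
--         pos = word.find(character)
--         if pos >= 0:
--             lst.append(pos)
--     if len(lst) == 0:
--         return word
--     else:
--         pos = min(lst)
--         order = ord(word[pos]) + 1
--         if order > 122:
--             order = 97
--         return word[:pos] + chr(order) + "a" * (len(word) - pos)
-- ===== SOURCE B (Python) =====
-- def remove_forbidden_chars(word):
--     for i, c in enumerate(word):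
--         if c in "ilo":
--             order = ord(c) + 1
--             if order > 122:
--                 order = 97
--             return word[:i] + chr(order) + "a" * (len(word) - i)
--     return word
-- ===== Notes on version B (the rewrite author's own statement) =====
-- stated objective: simpler
-- what changed: B replaces A's three separate str.find scans plus list/min bookkeeping by a single left-to-right scan that stops at the first forbidden character and builds the result there.
import Mathlib
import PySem

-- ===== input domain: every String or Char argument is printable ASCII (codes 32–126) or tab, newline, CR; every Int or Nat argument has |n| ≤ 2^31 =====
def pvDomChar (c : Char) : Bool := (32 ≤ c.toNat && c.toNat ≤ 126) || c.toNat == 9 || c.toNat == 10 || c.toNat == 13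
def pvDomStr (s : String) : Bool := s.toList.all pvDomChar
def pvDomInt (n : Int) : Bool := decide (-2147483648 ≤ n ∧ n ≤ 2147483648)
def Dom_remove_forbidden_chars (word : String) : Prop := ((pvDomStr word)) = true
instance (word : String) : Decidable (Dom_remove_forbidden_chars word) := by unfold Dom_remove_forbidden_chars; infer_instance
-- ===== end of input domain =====

-- B replaces A's three separate str.find scans plus list/min bookkeeping by one left-to-right
-- scan stopping at the first forbidden character (objective: simpler; same return value everywhere).

-- ===== PORT A =====
def remove_forbidden_chars (word : String) : String :=
  let cs := word.toList
  let lst := (['i', 'l', 'o'] : List Char).foldl (fun acc character =>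
      let pos := PySem.Chars.find cs [character]
      if 0 ≤ pos then acc ++ [pos] else acc) ([] : List Int)
  match PySem.List.min? lst id with           -- len(lst) == 0 ↔ min? = none
  | none => word
  | some pos =>
    match PySem.List.pyGet? cs pos with
    | none => word                            -- unreachable (pos is a valid index): totality guard only
    | some c =>
      let order := c.toNat + 1
      let order := if order > 122 then 97 else order
      String.mk (PySem.List.slice cs none (some pos) ++ [Char.ofNat order]
                 ++ List.replicate ((Int.ofNat cs.length - pos).toNat) 'a')

-- ===== PORT B =====
def forbiddenChars : List Char := ['i', 'l', 'o']   -- the string "ilo" of Source B's membership test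

def altGo (word : String) (i : Nat) : List Char → String
  | [] => word
  | c :: rest =>
    if c ∈ forbiddenChars then
      let order := c.toNat + 1
      let order := if order > 122 then 97 else order
      String.mk (word.toList.take i ++ [Char.ofNat order]
                 ++ List.replicate (word.toList.length - i) 'a')
    else altGo word (i + 1) rest

def remove_forbidden_chars_alt (word : String) : String :=
  altGo word 0 word.toList

-- ===== PRECONDITION & SPEC =====
def Spec_remove_forbidden_chars (word : String) (out : String) : Prop := out = remove_forbidden_chars_alt word
instance (word : String) (out : String) : Decidable (Spec_remove_forbidden_chars word out) := by unfold Spec_remove_forbidden_chars; infer_instance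

-- ===== CLAIM (what is proved, stated in full; the proofs are below) =====
def Claim_equal_remove_forbidden_chars : Prop := ∀ (word : String), Dom_remove_forbidden_chars word → Spec_remove_forbidden_chars word (remove_forbidden_chars word)

-- ===== LEMMAS AND PROOFS =====

-- proof-only helpers
def pvP (c : Char) : Bool := decide (c ∈ forbiddenChars)

def pvOut (word : String) (k : Nat) : String :=
  let c := (word.toList.getD k ' ')
  String.mk (word.toList.take k ++ [Char.ofNat (if c.toNat + 1 > 122 then 97 else c.toNat + 1)]
             ++ List.replicate (word.toList.length - k) 'a')

-- [c] is a prefix of l iff l starts with c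
lemma singleton_prefix_getElem? {c : Char} {l : List Char} (h : [c] <+: l) : l[0]? = some c := by
  obtain ⟨t, ht⟩ := h
  subst ht; rfl

-- the position A's find returns for a single character carries that character
lemma find_singleton_at {cs : List Char} {ch : Char} (h : 0 ≤ PySem.Chars.find cs [ch]) :
    cs[(PySem.Chars.find cs [ch]).toNat]? = some ch := by
  obtain ⟨hpre, _⟩ := PySem.Chars.find_spec h
  have := singleton_prefix_getElem? hpre
  rwa [List.getElem?_drop, Nat.add_zero] at this

-- B's loop equals the first-forbidden-index characterisation
lemma altGo_char (l : List Char) : ∀ (word : String) (i : Nat), word.toList.drop i = l →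
    altGo word i l = if l.findIdx pvP < l.length then pvOut word (i + l.findIdx pvP) else word := by
  induction l with
  | nil => intro word i h; simp [altGo]
  | cons c rest ih =>
    intro word i h
    by_cases hc : c ∈ forbiddenChars
    · have hP : pvP c = true := by simp [pvP, hc]
      have hget : word.toList[i]? = some c := by
        have : (word.toList.drop i)[0]? = some c := by rw [h]; rfl
        rwa [List.getElem?_drop, Nat.add_zero] at this
      simp [altGo, hc, List.findIdx_cons, hP, pvOut, List.getD, hget]
    · have hP : pvP c = false := by simp [pvP, hc]
      have hrest : word.toList.drop (i + 1) = rest := by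
        have : word.toList.drop (i + 1) = (word.toList.drop i).drop 1 := by
          rw [List.drop_drop]
        rw [this, h]; rfl
      have := ih word (i + 1) hrest
      simp only [altGo, hc, if_false, List.findIdx_cons, hP, cond_false, List.length_cons]
      rw [this]
      have harith : i + 1 + rest.findIdx pvP = i + (rest.findIdx pvP + 1) := by omega
      by_cases hlt : rest.findIdx pvP < rest.length
      · simp [hlt, harith]
      · simp [hlt]

-- A's result equals the same characterisation
lemma findIdx_le_of_getElem? (p : Char → Bool) (cs : List Char) (t : Nat) (c : Char)
    (h : cs[t]? = some c) (hp : p c = true) : cs.findIdx p ≤ t := by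
  by_contra hlt
  have ht : t < cs.length := by
    by_contra hge
    rw [List.getElem?_eq_none (by omega)] at h; simp at h
  have h2 : p cs[t] = false := List.not_of_lt_findIdx (by omega)
  rw [List.getElem?_eq_getElem ht, Option.some.injEq] at h
  rw [h, hp] at h2
  exact Bool.noConfusion h2

lemma a_char (word : String) :
    remove_forbidden_chars word =
      if word.toList.findIdx pvP < word.toList.length then pvOut word (word.toList.findIdx pvP) else word := by
  have hlst : List.foldl (fun acc character =>
        if 0 ≤ PySem.Chars.find word.toList [character]
        then acc ++ [PySem.Chars.find word.toList [character]] else acc) ([] : List Int) ['i', 'l', 'o']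
      = ((['i', 'l', 'o'] : List Char).filter
          (fun ch => decide (0 ≤ PySem.Chars.find word.toList [ch]))).map
          (fun ch => PySem.Chars.find word.toList [ch]) := by
    simp only [List.foldl_cons, List.foldl_nil, List.filter_cons, List.filter_nil,
      decide_eq_true_eq]
    split_ifs <;> simp_all
  simp only [remove_forbidden_chars]
  rw [hlst]
  by_cases hfound : word.toList.findIdx pvP < word.toList.length
  · -- some forbidden character occurs; k is its first index
    set k := word.toList.findIdx pvP with hk
    have hchP : pvP word.toList[k] = true := List.findIdx_getElem (w := hfound)
    have hchmem : word.toList[k] ∈ forbiddenChars := by simpa [pvP] using hchP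
    have hinfix : ([word.toList[k]] : List Char) <:+: word.toList :=
      (List.singleton_infix_iff _ _).mpr (List.getElem_mem hfound)
    have hpos : 0 ≤ PySem.Chars.find word.toList [word.toList[k]] :=
      (PySem.Chars.find_nonneg_iff _ _).mpr hinfix
    -- the find for the character at index k is exactly k
    have hfk : PySem.Chars.find word.toList [word.toList[k]] = (k : Int) := by
      obtain ⟨_, hmin⟩ := PySem.Chars.find_spec hpos
      have htk := find_singleton_at hpos
      have hdk : ([word.toList[k]] : List Char) <+: word.toList.drop k := by
        rw [List.drop_eq_getElem_cons hfound]
        exact ⟨_, rfl⟩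
      have htle : (PySem.Chars.find word.toList [word.toList[k]]).toNat ≤ k := by
        by_contra hlt; exact hmin k (by omega) hdk
      have hkle : k ≤ (PySem.Chars.find word.toList [word.toList[k]]).toNat :=
        findIdx_le_of_getElem? pvP word.toList _ _ htk hchP
      omega
    -- k is an element of lst …
    have hfmem : word.toList[k] ∈ (['i', 'l', 'o'] : List Char).filter
        (fun ch => decide (0 ≤ PySem.Chars.find word.toList [ch])) :=
      List.mem_filter.mpr ⟨by simpa [forbiddenChars] using hchmem, by simpa using hpos⟩
    have hkmem : (k : Int) ∈ ((['i', 'l', 'o'] : List Char).filter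
        (fun ch => decide (0 ≤ PySem.Chars.find word.toList [ch]))).map
          (fun ch => PySem.Chars.find word.toList [ch]) := by
      have := List.mem_map_of_mem (f := fun ch => PySem.Chars.find word.toList [ch]) hfmem
      simpa only [hfk] using this
    -- … and every element of lst is ≥ k
    have hlb : ∀ x ∈ ((['i', 'l', 'o'] : List Char).filter
        (fun ch => decide (0 ≤ PySem.Chars.find word.toList [ch]))).map
          (fun ch => PySem.Chars.find word.toList [ch]), (k : Int) ≤ x := by
      intro x hx
      obtain ⟨ch, hchf, hxeq⟩ := List.mem_map.mp hx
      obtain ⟨hch3, hdec⟩ := List.mem_filter.mp hchf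
      have hxpos : 0 ≤ PySem.Chars.find word.toList [ch] := by simpa using hdec
      have hpch : pvP ch = true := by
        simp only [pvP, forbiddenChars, decide_eq_true_eq]
        simpa using hch3
      have hat := find_singleton_at hxpos
      have hkle : k ≤ (PySem.Chars.find word.toList [ch]).toNat :=
        findIdx_le_of_getElem? pvP word.toList _ _ hat hpch
      omega
    -- now compute A
    rcases hmn : PySem.List.min? (((['i', 'l', 'o'] : List Char).filter
        (fun ch => decide (0 ≤ PySem.Chars.find word.toList [ch]))).map
          (fun ch => PySem.Chars.find word.toList [ch])) id with _ | m
    · exfalso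
      rw [(PySem.List.min?_eq_none_iff _ _).mp hmn] at hkmem
      exact absurd hkmem (List.not_mem_nil)
    · have hmmem := PySem.List.min?_mem hmn
      have hmle : (id m : Int) ≤ id (k : Int) := PySem.List.min?_isMin hmn (k : Int) hkmem
      have hklem : (k : Int) ≤ m := hlb m hmmem
      have hmk : m = (k : Int) := le_antisymm hmle hklem
      subst hmk
      have hget : PySem.List.pyGet? word.toList ((k : Nat) : Int) = some word.toList[k] := by
        rw [PySem.List.pyGet?_natCast, List.getElem?_eq_getElem hfound]
      simp only [hget, if_pos hfound]
      rw [PySem.List.slice_to word.toList (Int.natCast_nonneg k)]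
      simp only [pvOut]
      have hgd : word.toList.getD k ' ' = word.toList[k] := List.getD_eq_getElem _ _ hfound
      rw [hgd]
      have h2 : (Int.ofNat word.toList.length - (k : Int)).toNat = word.toList.length - k := by
        simp only [Int.ofNat_eq_natCast]; omega
      rw [Int.toNat_natCast, h2]
  · -- no forbidden character: every find is negative, lst is empty
    have hfil : (['i', 'l', 'o'] : List Char).filter
        (fun ch => decide (0 ≤ PySem.Chars.find word.toList [ch])) = [] := by
      rw [List.filter_eq_nil_iff]
      intro ch hch hdec
      have hpos : 0 ≤ PySem.Chars.find word.toList [ch] := by simpa using hdec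
      have hchmem : ch ∈ word.toList :=
        (List.singleton_infix_iff _ _).mp ((PySem.Chars.find_nonneg_iff word.toList [ch]).mp hpos)
      exact hfound (List.findIdx_lt_length_of_exists
        ⟨ch, hchmem, by simp only [pvP, decide_eq_true_eq]; simpa [forbiddenChars] using hch⟩)
    rw [hfil]
    rw [if_neg hfound]
    rfl

-- ===== VERDICT (by name: the statement is the Claim_ definition above) =====
theorem remove_forbidden_chars_spec : Claim_equal_remove_forbidden_chars := by
  intro word _
  unfold Spec_remove_forbidden_chars remove_forbidden_chars_alt
  rw [a_char, altGo_char word.toList word 0 (by simp)]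
  simp
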